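/- GENERATED by farm/mkstatement.py from design/units.tsv (unit `decode_all.1`) and the assertions of Vorbis/Spec/DecodeAll.lean — do not edit.
   THE STATEMENT of the proof unit `decode_all.1`: segment 1 of `decode_all` (34 instructions; entries 0x1034a0;
   exits 0x10357b; ranges 0x1034a0-0x103518 + 0x103545-0x103576)
   takes each of its entry assertions to one of its exit assertions (`Vorbis.Spec.decode_all.Seg1`), given the contracts of its callees.
   What the names mean: Vorbis/Spec/Basic.lean (the shared hypotheses), Vorbis/Spec/DecodeAll.lean (the assertions). The theorem to prove:
   `theorem decode_all_1_ok : Vorbis.Spec.decode_all_1.Statement`. -/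
import Vorbis.Spec.DecodeAll
import Vorbis.Spec.Top
namespace Vorbis.Spec.decode_all_1
open X86 X86.User Asan

/-- The statement of unit `decode_all.1`. -/
def Statement : Prop :=
  ∀ (Lay : Layout) (_hLay : Lay.hi = 0x1000000) (μ : Microarch) (_hμ : UserX.MicroOK μ) (u₀ : State)
    (_hcode : HasCodeNat Lay u₀ Vorbis.L.decode_all.entry Vorbis.Code.code_decode_all.nat Vorbis.L.decode_all.size)
    (_h_stb_vorbis_open_memory : ∀ (others : List Obj) (frames : List (Nat × FrameLayout)) (len : Nat), Calls Lay μ Vorbis.WayInv (Vorbis.conv u₀) Vorbis.L.stb_vorbis_open_memory.entry (Vorbis.Spec.stb_vorbis_open_memory.spec others frames len)),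
    Vorbis.Spec.decode_all.Seg1 Lay μ u₀

end Vorbis.Spec.decode_all_1
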